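-- pv_equiv track=rewrite | github.com/Tonychen0227/TournamentSeedingAnalysis | api.py | get_round_from_seed
-- ===== SOURCE A (Python) =====
-- SEEDING_TO_ROUNDS_FROM_FINAL = [1, 2, 3, 4, 5, 7, 9, 13, 17, 25, 33, 49, 65, 97, 129, 193, 257, 385, 513, 769, 1025, 1537, 2049, 3073, 4097]
--
-- def get_round_from_seed(seed):
--     prev_index = -1
--     for index, value in enumerate(SEEDING_TO_ROUNDS_FROM_FINAL):
--         if value == seed:
--             return index
--         if value >= seed:
--             return prev_index
--
--         prev_index = index
-- ===== SOURCE B (Python) =====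
-- SEEDING_TO_ROUNDS_FROM_FINAL = [1, 2, 3, 4, 5, 7, 9, 13, 17, 25, 33, 49, 65, 97, 129, 193, 257, 385, 513, 769, 1025, 1537, 2049, 3073, 4097]
--
-- def get_round_from_seed(seed):
--     table = SEEDING_TO_ROUNDS_FROM_FINAL
--     lo, hi = 0, len(table)
--     while lo < hi:
--         mid = (lo + hi) // 2
--         if table[mid] < seed:
--             lo = mid + 1
--         else:
--             hi = mid
--     if lo < len(table) and table[lo] == seed:
--         return lo
--     if lo == len(table):
--         return None
--     return lo - 1
-- ===== Notes on version B (the rewrite author's own statement) =====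
-- stated objective: alternative
-- what changed: Replaced A's linear scan with its prev_index accumulator by a bisect_left-style binary search over the sorted table, deriving the exact-match / overshoot / past-the-end answer from the insertion point.
import Mathlib
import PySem

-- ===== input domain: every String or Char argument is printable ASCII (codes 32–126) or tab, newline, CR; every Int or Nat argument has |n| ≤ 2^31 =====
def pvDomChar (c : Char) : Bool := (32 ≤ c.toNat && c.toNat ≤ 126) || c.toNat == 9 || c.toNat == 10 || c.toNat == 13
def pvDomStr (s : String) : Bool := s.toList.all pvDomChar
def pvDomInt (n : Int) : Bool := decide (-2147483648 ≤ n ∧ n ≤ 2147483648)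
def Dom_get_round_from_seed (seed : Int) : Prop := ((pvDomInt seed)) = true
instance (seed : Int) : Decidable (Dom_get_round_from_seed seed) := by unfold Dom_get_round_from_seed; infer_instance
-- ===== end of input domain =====

-- B replaces A's linear scan of the table (with its prev_index accumulator) by a hand-written
-- bisect_left-style binary search over the sorted table; same return value everywhere.

def pvTable : List Int := [1, 2, 3, 4, 5, 7, 9, 13, 17, 25, 33, 49, 65, 97, 129, 193, 257, 385, 513, 769, 1025, 1537, 2049, 3073, 4097]

-- ===== PORT A =====
-- the 'for index, value in enumerate(...)' loop with its 'prev_index' accumulator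
def pvLoopA (seed : Int) : List Int → Int → Int → Option Int
  | [], _, _ => none
  | v :: rest, idx, prev =>
    if v = seed then some idx
    else if v ≥ seed then some prev
    else pvLoopA seed rest (idx + 1) idx

def get_round_from_seed (seed : Int) : Option Int := pvLoopA seed pvTable 0 (-1)

-- ===== PORT B =====
-- the while-loop binary search of Source B (bisect_left over the sorted table)
def pvBisect (seed : Int) (xs : List Int) (lo hi : Nat) : Nat :=
  if _h : lo < hi then
    let mid := (lo + hi) / 2
    if xs.getD mid 0 < seed then pvBisect seed xs (mid + 1) hi
    else pvBisect seed xs lo mid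
  else lo
termination_by hi - lo
decreasing_by all_goals omega

def get_round_from_seed_alt (seed : Int) : Option Int :=
  let i := pvBisect seed pvTable 0 pvTable.length
  if i < pvTable.length ∧ pvTable.getD i 0 = seed then some (i : Int)
  else if i = pvTable.length then none
  else some ((i : Int) - 1)

-- ===== PRECONDITION & SPEC =====
def Spec_get_round_from_seed (seed : Int) (out : Option Int) : Prop := out = get_round_from_seed_alt seed
instance (seed : Int) (out : Option Int) : Decidable (Spec_get_round_from_seed seed out) := by unfold Spec_get_round_from_seed; infer_instance

-- ===== CLAIM (what is proved, stated in full; the proofs are below) =====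
def Claim_equal_get_round_from_seed : Prop := ∀ (seed : Int), Dom_get_round_from_seed seed → Spec_get_round_from_seed seed (get_round_from_seed seed)

-- ===== LEMMAS AND PROOFS =====

-- A's scan returns the first index k with seed ≤ xs[k] (exact hit → k, overshoot → k-1), none if no such k.
theorem pvLoopA_eq (seed : Int) (xs : List Int) (idx : Int) :
    pvLoopA seed xs idx (idx - 1) =
      (if xs.findIdx (fun v => seed ≤ v) < xs.length then
         (if xs.getD (xs.findIdx (fun v => seed ≤ v)) 0 = seed
          then some (idx + (xs.findIdx (fun v => seed ≤ v) : Int))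
          else some (idx + (xs.findIdx (fun v => seed ≤ v) : Int) - 1))
       else none) := by
  induction xs generalizing idx with
  | nil => simp [pvLoopA]
  | cons v rest ih =>
    by_cases hle : seed ≤ v
    · by_cases heq : v = seed
      · simp [pvLoopA, heq, List.findIdx_cons]
      · have hne : ¬ (v = seed) := heq
        simp [pvLoopA, hne, hle, List.findIdx_cons, ge_iff_le]
    · have hne : ¬ (v = seed) := by intro h; exact hle (le_of_eq h.symm)
      have hge : ¬ (v ≥ seed) := hle
      have step : pvLoopA seed (v :: rest) idx (idx - 1)
          = pvLoopA seed rest (idx + 1) idx := by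
        simp [pvLoopA, hne, hge]
      have hidx : idx + 1 - 1 = idx := by ring
      have hih := ih (idx + 1)
      rw [hidx] at hih
      rw [step, hih]
      simp only [List.findIdx_cons, List.length_cons]
      have hb : (decide (seed ≤ v)) = false := by simp [hle]
      rw [hb]
      simp only [cond_false]
      have hcons : ((v :: rest).getD (List.findIdx (fun v => decide (seed ≤ v)) rest + 1) 0)
          = rest.getD (List.findIdx (fun v => decide (seed ≤ v)) rest) 0 := rfl
      by_cases hk : List.findIdx (fun v => decide (seed ≤ v)) rest < rest.length
      · rw [if_pos hk,
          if_pos (show List.findIdx (fun v => decide (seed ≤ v)) rest + 1 < rest.length + 1 by omega),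
          hcons]
        by_cases hgd : rest.getD (List.findIdx (fun v => decide (seed ≤ v)) rest) 0 = seed
        · rw [if_pos hgd, if_pos hgd]; congr 1; push_cast; ring
        · rw [if_neg hgd, if_neg hgd]; congr 1; push_cast; ring
      · rw [if_neg hk,
          if_neg (show ¬ (List.findIdx (fun v => decide (seed ≤ v)) rest + 1 < rest.length + 1) by omega)]

-- binary-search invariant: everything left of the result is < seed, everything at/right of it is ≥ seed
theorem pvBisect_inv (seed : Int) (xs : List Int)
    (hs : ∀ i j (hi : i < xs.length) (hj : j < xs.length), i ≤ j → xs[i] ≤ xs[j])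
    (lo hi : Nat) (hle : lo ≤ hi) (hhi : hi ≤ xs.length)
    (hlo : ∀ j (hj : j < xs.length), j < lo → xs[j] < seed)
    (hup : ∀ j (hj : j < xs.length), hi ≤ j → seed ≤ xs[j]) :
    (∀ j (hj : j < xs.length), j < pvBisect seed xs lo hi → xs[j] < seed) ∧
    (∀ j (hj : j < xs.length), pvBisect seed xs lo hi ≤ j → seed ≤ xs[j]) ∧
    pvBisect seed xs lo hi ≤ xs.length := by
  rw [pvBisect]
  by_cases h : lo < hi
  · rw [dif_pos h]
    have hmidlt : (lo + hi) / 2 < hi := by omega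
    have hmidge : lo ≤ (lo + hi) / 2 := by omega
    have hmidlen : (lo + hi) / 2 < xs.length := by omega
    have hgd : xs.getD ((lo + hi) / 2) 0 = xs[(lo + hi) / 2] := List.getD_eq_getElem xs 0 hmidlen
    by_cases hc : xs.getD ((lo + hi) / 2) 0 < seed
    · simp only [if_pos hc]
      exact pvBisect_inv seed xs hs ((lo + hi) / 2 + 1) hi (by omega) hhi
        (by
          intro j hj hjlt
          have : xs[j] ≤ xs[(lo + hi) / 2] := hs j ((lo + hi) / 2) hj hmidlen (by omega)
          calc xs[j] ≤ xs[(lo + hi) / 2] := this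
            _ < seed := by rw [← hgd]; exact hc)
        hup
    · simp only [if_neg hc]
      exact pvBisect_inv seed xs hs lo ((lo + hi) / 2) hmidge (by omega) hlo
        (by
          intro j hj hjge
          have h1 : seed ≤ xs[(lo + hi) / 2] := by rw [← hgd]; omega
          exact le_trans h1 (hs ((lo + hi) / 2) j hmidlen hj hjge))
  · rw [dif_neg h]
    have : lo = hi := by omega
    subst this
    exact ⟨hlo, hup, by omega⟩
termination_by hi - lo
decreasing_by all_goals omega

-- the result of the binary search is exactly findIdx (seed ≤ ·)
theorem pvBisect_eq_findIdx (seed : Int) (xs : List Int)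
    (hs : ∀ i j (hi : i < xs.length) (hj : j < xs.length), i ≤ j → xs[i] ≤ xs[j]) :
    pvBisect seed xs 0 xs.length = xs.findIdx (fun v => seed ≤ v) := by
  obtain ⟨h1, h2, h3⟩ := pvBisect_inv seed xs hs 0 xs.length (by omega) (le_refl _)
    (by intro j hj hjlt; omega) (by intro j hj hjge; omega)
  by_cases hlt : pvBisect seed xs 0 xs.length < xs.length
  · symm
    rw [List.findIdx_eq hlt]
    constructor
    · simpa using h2 _ hlt (le_refl _)
    · intro j hji
      have := h1 j (by omega) hji
      simp; omega
  · have hlen : pvBisect seed xs 0 xs.length = xs.length := by omega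
    rw [hlen]
    symm
    rw [List.findIdx_eq_length]
    intro x hx
    obtain ⟨j, hj, rfl⟩ := List.mem_iff_getElem.mp hx
    have := h1 j hj (by omega)
    simp; omega

theorem pvTable_sorted : ∀ i j (hi : i < pvTable.length) (hj : j < pvTable.length),
    i ≤ j → pvTable[i] ≤ pvTable[j] := by
  have hp : List.Pairwise (· ≤ ·) pvTable := by decide
  intro i j hi hj hij
  rcases Nat.eq_or_lt_of_le hij with rfl | hlt
  · exact le_refl _
  · exact (List.pairwise_iff_getElem.mp hp) i j hi hj hlt

-- ===== VERDICT (by name: the statement is the Claim_ definition above) =====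
theorem get_round_from_seed_spec : Claim_equal_get_round_from_seed := by
  intro seed _
  simp only [Spec_get_round_from_seed, get_round_from_seed, get_round_from_seed_alt]
  rw [pvBisect_eq_findIdx seed pvTable pvTable_sorted]
  have hA := pvLoopA_eq seed pvTable 0
  rw [show (0 : Int) - 1 = -1 by norm_num] at hA
  rw [hA]
  by_cases hklt : pvTable.findIdx (fun v => decide (seed ≤ v)) < pvTable.length
  · by_cases hgd : pvTable.getD (pvTable.findIdx (fun v => decide (seed ≤ v))) 0 = seed
    · rw [if_pos hklt, if_pos hgd, if_pos ⟨hklt, hgd⟩]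
      norm_num
    · have hkne : ¬ pvTable.findIdx (fun v => decide (seed ≤ v)) = pvTable.length := by omega
      rw [if_pos hklt, if_neg hgd, if_neg (fun h => hgd h.2), if_neg hkne]
      norm_num
  · have hkeq : pvTable.findIdx (fun v => decide (seed ≤ v)) = pvTable.length := by
      have := List.findIdx_le_length (p := fun v => decide (seed ≤ v)) (xs := pvTable)
      omega
    rw [if_neg hklt, if_neg (fun h => hklt h.1), if_pos hkeq]
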